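-- pv_equiv track=rewrite | github.com/nikotheflow/Python-labs | lab3/3.3.py | check
-- ===== SOURCE A (Python) =====
-- def row(matrix):
-- 	return len(matrix)
--
-- def col(matrix):
-- 	return len(matrix[0])
--
-- def  check(matrix):
-- 	list = []
-- 	for i in range (0, row(matrix)):
-- 		flag = 0
-- 		for j in range(0, col(matrix)):
-- 			if matrix[i][j] != 0:
-- 				flag = 1
-- 		if flag == 0:
-- 			list.append(i)
--
-- 	step = 0
-- 	for i in list:
-- 		del matrix[i - step]
-- 		step += 1
--
-- 	list = []
-- 	for j in range(0,len(matrix[0])):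
-- 		flag = 0
-- 		for i in range (0, row(matrix)):
-- 			if matrix [i] [j] != 0:
-- 				flag = 1
-- 		if flag == 0:
-- 			list.append(j)
--
-- 	step = 0
-- 	for j in list:
-- 		for i in range(0,row(matrix)):
-- 			del matrix[i][j - step]
-- 		step += 1
--
-- 	return matrix
-- ===== SOURCE B (Python) =====
-- # B: filter nonzero rows, collect the set of nonzero column indices in one pass, rebuild.
-- # Like A, mutates the passed matrix in place (matrix[:] = ...) and returns it.
-- def check(matrix):
--     rows = [r for r in matrix if any(v != 0 for v in r)]
--     cols = sorted({j for r in rows for j, v in enumerate(r) if v != 0})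
--     matrix[:] = [[r[j] for j in cols] for r in rows]
--     return matrix
-- ===== Notes on version B (the rewrite author's own statement) =====
-- stated objective: simpler
-- what changed: A finds all-zero rows/columns via index loops with flag variables and then deletes them in place with shifted del-indices; B filters the nonzero rows directly, collects the set of column indices that carry a nonzero in one pass over the surviving rows, and rebuilds each row by projecting onto the sorted index set.
-- outside the precondition, e.g. on check([[1], [2, 3]]): A returns [[1], [2, 3]], B raises IndexError
import Mathlib
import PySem

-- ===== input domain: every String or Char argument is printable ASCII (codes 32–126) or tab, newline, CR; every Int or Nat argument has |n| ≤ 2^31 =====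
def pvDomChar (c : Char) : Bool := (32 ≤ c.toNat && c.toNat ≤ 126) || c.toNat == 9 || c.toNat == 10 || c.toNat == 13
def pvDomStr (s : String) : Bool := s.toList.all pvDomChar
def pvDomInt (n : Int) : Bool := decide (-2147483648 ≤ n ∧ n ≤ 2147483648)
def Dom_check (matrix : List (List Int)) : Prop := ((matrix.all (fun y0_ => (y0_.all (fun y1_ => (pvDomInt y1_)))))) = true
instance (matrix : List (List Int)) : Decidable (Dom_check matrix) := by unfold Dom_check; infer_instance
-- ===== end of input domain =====

-- B removes all-zero rows/columns by filtering rows and projecting onto the set of nonzero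
-- column indices instead of A's flag loops plus in-place shifted deletions (objective: simpler).
-- Both Pythons mutate the passed list in place; the equivalence proved here is about the return value.

-- ===== PORT A =====
-- row(matrix) / col(matrix); col raises IndexError on [], which Pre_ excludes
def pvRow (m : List (List Int)) : Int := PySem.List.len m
def pvCol (m : List (List Int)) : Int := PySem.List.len (PySem.List.pyGetD m 0 [])

-- 'del xs[i]'; exact where the index is in range (which Pre_ guarantees at every use)
def pvDel {α : Type} (xs : List α) (i : Int) : List α :=
  ((PySem.List.pop? xs i).map Prod.snd).getD xs

def check (matrix : List (List Int)) : List (List Int) :=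
  -- collect indices of all-zero rows (flag loop), then delete them with shifted indices
  let lst1 : List Int := (PySem.List.pyRange 0 (pvRow matrix) 1).foldl (fun acc i =>
    let flag : Int := (PySem.List.pyRange 0 (pvCol matrix) 1).foldl (fun flag j =>
      if PySem.List.pyGetD (PySem.List.pyGetD matrix i []) j 0 ≠ 0 then 1 else flag) 0
    if flag = 0 then acc ++ [i] else acc) []
  let st1 := lst1.foldl (fun st i => (pvDel st.1 (i - st.2), st.2 + 1)) (matrix, (0 : Int))
  let m1 := st1.1
  -- collect indices of all-zero columns, then delete that column from every row, shifted
  let lst2 : List Int := (PySem.List.pyRange 0 (PySem.List.len (PySem.List.pyGetD m1 0 [])) 1).foldl (fun acc j =>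
    let flag : Int := (PySem.List.pyRange 0 (pvRow m1) 1).foldl (fun flag i =>
      if PySem.List.pyGetD (PySem.List.pyGetD m1 i []) j 0 ≠ 0 then 1 else flag) 0
    if flag = 0 then acc ++ [j] else acc) []
  let st2 := lst2.foldl (fun st j =>
      ((PySem.List.pyRange 0 (pvRow st.1) 1).foldl (fun m i =>
        PySem.List.pySetD m i (pvDel (PySem.List.pyGetD m i []) (j - st.2))) st.1,
       st.2 + 1)) (m1, (0 : Int))
  st2.1

-- ===== PORT B =====
def check_alt (matrix : List (List Int)) : List (List Int) :=
  let rows := matrix.filter (fun r => r.any (fun v => decide (v ≠ 0)))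
  let cols := PySem.List.sorted
    (PySem.Set.ofList (rows.foldl (fun acc r =>
      acc ++ (((PySem.List.enumerate r 0).filter (fun p => decide (p.2 ≠ 0))).map Prod.fst)) []))
    (fun j => j) false
  rows.map (fun r => cols.map (fun j => PySem.List.pyGetD r j 0))

-- ===== PRECONDITION & SPEC =====
-- Pre_ excludes non-rectangular inputs (A reads every row up to the first row's length and
-- deletes columns from every row, so it raises IndexError on most ragged inputs and B raises
-- on the rest) and inputs with no nonzero entry, on which A raises IndexError at matrix[0]
-- after deleting every row.
def Pre_check (matrix : List (List Int)) : Prop :=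
  (∀ r ∈ matrix, r.length = (matrix.headD []).length) ∧ ∃ r ∈ matrix, ∃ v ∈ r, v ≠ 0
instance (matrix : List (List Int)) : Decidable (Pre_check matrix) := by
  unfold Pre_check; infer_instance
def pvWitness_check : List (List Int) := [[0, 1], [0, 0]]

def Spec_check (matrix : List (List Int)) (out : List (List Int)) : Prop := out = check_alt matrix
instance (matrix : List (List Int)) (out : List (List Int)) : Decidable (Spec_check matrix out) := by unfold Spec_check; infer_instance

-- ===== CLAIM (what is proved, stated in full; the proofs are below) =====
def Claim_equal_check : Prop := ∀ (matrix : List (List Int)), Dom_check matrix → Pre_check matrix → Spec_check matrix (check matrix)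

-- ===== LEMMAS AND PROOFS =====

-- drop the elements whose absolute index (starting at k) satisfies q
def dropIdx {α : Type} (q : Nat → Bool) : Nat → List α → List α
  | _, [] => []
  | k, x :: xs => if q k then dropIdx q (k+1) xs else x :: dropIdx q (k+1) xs

lemma eraseIdx_append_cons {α : Type} (front : List α) (x : α) (xs : List α) :
    (front ++ x :: xs).eraseIdx front.length = front ++ xs := by
  induction front with
  | nil => rfl
  | cons a t ih => simpa using ih

lemma set_append_cons {α : Type} (front : List α) (x v : α) (xs : List α) :
    (front ++ x :: xs).set front.length v = front ++ v :: xs := by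
  induction front with
  | nil => rfl
  | cons a t ih => simpa using ih

lemma getD_append_cons {α : Type} (front : List α) (x d : α) (xs : List α) :
    (front ++ x :: xs).getD front.length d = x := by
  induction front with
  | nil => rfl
  | cons a t ih => simpa using ih

lemma pvDel_append {α : Type} (front : List α) (x : α) (xs : List α) :
    pvDel (front ++ x :: xs) ((front.length : Nat) : Int) = front ++ xs := by
  unfold pvDel
  have hh := PySem.List.pop?_natCast (xs := front ++ x :: xs) (n := front.length)
    (by simp only [List.length_append, List.length_cons]; omega)
  rw [hh]
  simp [eraseIdx_append_cons]

lemma flag_any (r : List Int) (a : Int) :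
    List.foldl (fun flag v => if v ≠ 0 then 1 else flag) a r
      = if r.any (fun v => decide (v ≠ 0)) then 1 else a := by
  induction r generalizing a with
  | nil => simp
  | cons x t ih =>
    simp only [List.foldl_cons]
    rw [ih]
    by_cases h : x = 0 <;> simp [h]

lemma flag_any_col (m : List (List Int)) (j : Int) (a : Int) :
    List.foldl (fun flag r => if PySem.List.pyGetD r j 0 ≠ 0 then 1 else flag) a m
      = if m.any (fun r => decide (PySem.List.pyGetD r j 0 ≠ 0)) then 1 else a := by
  induction m generalizing a with
  | nil => simp
  | cons x t ih =>
    simp only [List.foldl_cons]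
    rw [ih]
    by_cases h : PySem.List.pyGetD x j 0 = 0 <;> simp [h]

lemma collect_eq (c : Nat) (P : Int → Prop) [DecidablePred P] :
    (PySem.List.pyRange 0 (c : Int) 1).foldl (fun acc j => if P j then acc ++ [j] else acc) []
      = ((List.range c).filter (fun k : Nat => decide (P (k : Int)))).map (fun k : Nat => (k : Int)) := by
  rw [PySem.List.foldl_append_ite_eq_filter]
  rw [PySem.List.pyRange_zero_natCast]
  rw [List.filter_map]
  simp [Function.comp_def]

lemma del_fold {α : Type} (q : Nat → Bool) :
    ∀ (rest front : List α) (k s : Nat), front.length + s = k →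
    (((List.range' k rest.length).filter q).map (fun i : Nat => (i : Int))).foldl
        (fun st i => (pvDel st.1 (i - st.2), st.2 + 1)) (front ++ rest, (s : Int))
      = (front ++ dropIdx q k rest,
         (s : Int) + ((List.range' k rest.length).filter q).length) := by
  intro rest
  induction rest with
  | nil => intro front k s h; simp [dropIdx]
  | cons x xs ih =>
    intro front k s h
    simp only [List.length_cons, List.range'_succ]
    by_cases hq : q k
    · simp only [List.filter_cons, hq, if_pos, List.map_cons, List.foldl_cons]
      have h1 : (k : Int) - (s : Int) = ((front.length : Nat) : Int) := by push_cast; omega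
      rw [h1, pvDel_append]
      have h2 : ((s : Int) + 1) = ((s + 1 : Nat) : Int) := by push_cast; ring
      rw [h2, ih front (k+1) (s+1) (by omega)]
      simp only [dropIdx, hq, if_pos, Prod.mk.injEq, List.length_cons]
      refine ⟨by trivial, by push_cast; ring⟩
    · simp only [List.filter_cons, hq, if_neg, Bool.false_eq_true, not_false_iff]
      rw [show front ++ x :: xs = (front ++ [x]) ++ xs from by simp]
      rw [ih (front ++ [x]) (k+1) s (by simp; omega)]
      simp [dropIdx, hq]

lemma dropIdx_getD {α : Type} (p : α → Bool) (d : α) :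
    ∀ (xs front : List α),
      dropIdx (fun i => !p ((front ++ xs).getD i d)) front.length xs = xs.filter p := by
  intro xs
  induction xs with
  | nil => intro front; rfl
  | cons x t ih =>
    intro front
    simp only [dropIdx, getD_append_cons, List.filter_cons]
    rw [show front ++ x :: t = (front ++ [x]) ++ t from by simp,
        show front.length + 1 = (front ++ [x]).length from by simp]
    by_cases hp : p x
    · simp only [hp, Bool.not_true, Bool.false_eq_true, if_neg, if_pos, ih (front ++ [x])]
      simp
    · simp only [hp, Bool.not_false, if_pos, Bool.false_eq_true, if_neg, ih (front ++ [x])]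
      simp

lemma dropIdx_map {α : Type} (q : Nat → Bool) (d : α) :
    ∀ (xs front : List α),
      dropIdx q front.length xs
        = ((List.range' front.length xs.length).filter (fun i => !q i)).map
            (fun i => (front ++ xs).getD i d) := by
  intro xs
  induction xs with
  | nil => intro front; rfl
  | cons x t ih =>
    intro front
    simp only [dropIdx, List.length_cons, List.range'_succ, List.filter_cons]
    by_cases hq : q front.length
    · simp only [hq, if_pos, Bool.not_true, Bool.false_eq_true, if_neg]
      rw [show front ++ x :: t = (front ++ [x]) ++ t from by simp,
          show front.length + 1 = (front ++ [x]).length from by simp]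
      exact ih (front ++ [x])
    · simp only [hq, Bool.false_eq_true, if_neg, Bool.not_false, if_pos, List.map_cons,
        getD_append_cons]
      rw [show front ++ x :: t = (front ++ [x]) ++ t from by simp,
          show front.length + 1 = (front ++ [x]).length from by simp]
      exact congrArg (x :: ·) (ih (front ++ [x]))

lemma setfold_map (g : List Int → List Int) :
    ∀ (rest front : List (List Int)),
      (PySem.List.pyRange ((front.length : Nat) : Int) (((front.length + rest.length : Nat) : Nat) : Int) 1).foldl
          (fun m i => PySem.List.pySetD m i (g (PySem.List.pyGetD m i []))) (front.map g ++ rest)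
        = (front ++ rest).map g := by
  intro rest
  induction rest with
  | nil => intro front; simp [PySem.List.pyRange_one_eq_nil]
  | cons x xs ih =>
    intro front
    rw [PySem.List.pyRange_one_cons (by simp only [List.length_cons]; push_cast; omega)]
    simp only [List.foldl_cons, PySem.List.pyGetD_natCast, PySem.List.pySetD_natCast]
    have hga : (List.map g front ++ x :: xs).getD front.length [] = x := by
      rw [show front.length = (front.map g).length by simp]
      exact getD_append_cons (front.map g) x [] xs
    have hsa : (List.map g front ++ x :: xs).set front.length (g x)
        = List.map g (front ++ [x]) ++ xs := by
      rw [show front.length = (front.map g).length by simp]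
      rw [set_append_cons]; simp
    rw [hga, hsa]
    have e1 : ((front.length : Nat) : Int) + 1 = (((front ++ [x]).length : Nat) : Int) := by
      simp
    have e2 : (((front.length + (x :: xs).length : Nat) : Nat) : Int)
        = ((((front ++ [x]).length + xs.length : Nat) : Nat) : Int) := by
      simp only [List.length_cons, List.length_append]
      push_cast; simp; ring
    rw [e1, e2, ih (front ++ [x])]
    simp

lemma setfold_map0 (g : List Int → List Int) (m : List (List Int)) :
    (PySem.List.pyRange 0 (PySem.List.len m) 1).foldl
        (fun m2 i => PySem.List.pySetD m2 i (g (PySem.List.pyGetD m2 i []))) m = m.map g := by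
  have h := setfold_map g m []
  simpa using h

lemma foldmap : ∀ (lst : List Int) (m : List (List Int)) (s : Int),
    lst.foldl (fun st j => (st.1.map (fun r => pvDel r (j - st.2)), st.2 + 1)) (m, s)
      = (m.map (fun r => (lst.foldl (fun st j => (pvDel st.1 (j - st.2), st.2 + 1)) (r, s)).1),
         s + lst.length) := by
  intro lst
  induction lst with
  | nil => intro m s; simp
  | cons j t ih =>
    intro m s
    simp only [List.foldl_cons]
    rw [ih]
    simp only [List.map_map, Prod.mk.injEq, List.length_cons]
    refine ⟨by simp [Function.comp_def], by push_cast; ring⟩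

theorem check_spec : Claim_equal_check := by
  intro matrix _hdom hpre
  obtain ⟨hrect, hnz⟩ := hpre
  unfold Spec_check
  -- my own elaboration of A's unfolded body (definitional)
  have hA : check matrix = (
      let lst1 : List Int :=
        (PySem.List.pyRange 0 (matrix.length : Int) 1).foldl (fun acc i =>
          if (PySem.List.pyRange 0 ((PySem.List.pyGetD matrix 0 []).length : Int) 1).foldl
              (fun flag j => if PySem.List.pyGetD (PySem.List.pyGetD matrix i []) j 0 ≠ 0 then 1 else flag)
              (0 : Int) = 0 then acc ++ [i] else acc) [];
      let m1 : List (List Int) :=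
        (lst1.foldl (fun st i => (pvDel st.1 (i - st.2), st.2 + 1)) (matrix, (0 : Int))).1;
      let lst2 : List Int :=
        (PySem.List.pyRange 0 ((PySem.List.pyGetD m1 0 []).length : Int) 1).foldl (fun acc j =>
          if (PySem.List.pyRange 0 (m1.length : Int) 1).foldl
              (fun flag i => if PySem.List.pyGetD (PySem.List.pyGetD m1 i []) j 0 ≠ 0 then 1 else flag)
              (0 : Int) = 0 then acc ++ [j] else acc) [];
      (lst2.foldl (fun st j =>
          ((PySem.List.pyRange 0 (st.1.length : Int) 1).foldl (fun m i =>
            PySem.List.pySetD m i (pvDel (PySem.List.pyGetD m i []) (j - st.2))) st.1,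
           st.2 + 1)) (m1, (0 : Int))).1) := rfl
  -- my own elaboration of B's unfolded body (definitional)
  have hB : check_alt matrix = (
      let rows := matrix.filter (fun r => r.any (fun v => decide (v ≠ 0)));
      let cols := PySem.List.sorted (PySem.Set.ofList (rows.foldl (fun acc r =>
          acc ++ (((PySem.List.enumerate r 0).filter (fun p => decide (p.2 ≠ 0))).map Prod.fst)) []))
        (fun j => j) false;
      rows.map (fun r => cols.map (fun j => PySem.List.pyGetD r j 0))) := rfl
  rw [hA, hB]
  simp only []
  set c : Nat := (matrix.headD []).length with hcdef
  have hcol : (PySem.List.pyGetD matrix 0 []).length = c := by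
    cases matrix with
    | nil => simp [hcdef, PySem.List.pyGetD, PySem.List.pyGet?]
    | cons a t => simp [hcdef, PySem.List.pyGetD_zero_cons]
  rw [hcol]
  rw [collect_eq matrix.length
    (fun i => (PySem.List.pyRange 0 (c : Int) 1).foldl
      (fun flag j => if PySem.List.pyGetD (PySem.List.pyGetD matrix i []) j 0 ≠ 0 then 1 else flag)
      (0 : Int) = 0)]
  -- the collected indices are exactly the all-zero-row indices
  rw [show (List.range matrix.length).filter
        (fun (k : Nat) => decide ((PySem.List.pyRange 0 (c : Int) 1).foldl
          (fun flag j => if PySem.List.pyGetD (PySem.List.pyGetD matrix (k : Int) []) j 0 ≠ 0 then 1 else flag)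
          (0 : Int) = 0))
      = (List.range matrix.length).filter
          (fun (k : Nat) => !((matrix.getD k []).any (fun v => decide (v ≠ 0)))) from
    List.filter_congr (by
      intro k hk
      rw [List.mem_range] at hk
      rw [PySem.List.pyGetD_natCast]
      have hmem : matrix.getD k [] ∈ matrix := by
        rw [List.getD_eq_getElem matrix [] hk]; exact List.getElem_mem hk
      have hlen : (matrix.getD k []).length = c := hrect _ hmem
      rw [← hlen]
      rw [PySem.List.foldl_pyRange_zero_pyGetD' (matrix.getD k []) 0
        (fun flag v => if v ≠ 0 then 1 else flag) 0]
      rw [flag_any (matrix.getD k []) 0]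
      cases hnzk : (matrix.getD k []).any (fun v => decide (v ≠ 0)) with
      | true => simp [hnzk]
      | false => simp [hnzk])]
  -- Phase 1 deletions: the shifted del loop is the row filter
  have hdel1 : (List.foldl (fun st i => (pvDel st.1 (i - st.2), st.2 + 1)) (matrix, (0 : Int))
      (((List.range matrix.length).filter
        (fun (k : Nat) => !((matrix.getD k []).any (fun v => decide (v ≠ 0))))).map
          (fun k : Nat => (k : Int)))).1
      = matrix.filter (fun r => r.any (fun v => decide (v ≠ 0))) := by
    have h := del_fold (fun k => !((matrix.getD k []).any (fun v => decide (v ≠ 0))))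
      matrix [] 0 0 (by simp)
    simp only [List.nil_append, Nat.cast_zero] at h
    rw [← List.range_eq_range'] at h
    rw [h]
    have h2 := dropIdx_getD (fun r => r.any (fun v => decide (v ≠ 0))) ([] : List Int) matrix []
    simpa using h2
  rw [hdel1]
  -- the surviving rows: nonempty, all of length c
  have hrne : matrix.filter (fun r => r.any (fun v => decide (v ≠ 0))) ≠ [] := by
    obtain ⟨r, hr, v, hv, hne⟩ := hnz
    exact List.ne_nil_of_mem (List.mem_filter.mpr ⟨hr, by
      rw [List.any_eq_true]; exact ⟨v, hv, by simpa using hne⟩⟩)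
  have hrlen : ∀ r ∈ matrix.filter (fun r => r.any (fun v => decide (v ≠ 0))), r.length = c :=
    fun r hr => hrect r (List.mem_filter.mp hr).1
  have hfst : (PySem.List.pyGetD (matrix.filter (fun r => r.any (fun v => decide (v ≠ 0)))) 0 []).length = c := by
    obtain ⟨w0, wrest, hw⟩ := List.exists_cons_of_ne_nil hrne
    rw [hw, PySem.List.pyGetD_zero_cons]
    exact hrlen w0 (hw ▸ List.mem_cons_self)
  rw [hfst]
  rw [collect_eq c
    (fun j => (PySem.List.pyRange 0
        ((matrix.filter (fun r => r.any (fun v => decide (v ≠ 0)))).length : Int) 1).foldl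
      (fun flag i => if PySem.List.pyGetD (PySem.List.pyGetD
        (matrix.filter (fun r => r.any (fun v => decide (v ≠ 0)))) i []) j 0 ≠ 0 then 1 else flag)
      (0 : Int) = 0)]
  -- the collected column indices are exactly the all-zero-column indices
  rw [show (List.range c).filter
        (fun (k : Nat) => decide ((PySem.List.pyRange 0
            ((matrix.filter (fun r => r.any (fun v => decide (v ≠ 0)))).length : Int) 1).foldl
          (fun flag i => if PySem.List.pyGetD (PySem.List.pyGetD
            (matrix.filter (fun r => r.any (fun v => decide (v ≠ 0)))) i []) (k : Int) 0 ≠ 0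
            then 1 else flag)
          (0 : Int) = 0))
      = (List.range c).filter
          (fun (k : Nat) => !((matrix.filter (fun r => r.any (fun v => decide (v ≠ 0)))).any
            (fun r => decide (r.getD k 0 ≠ 0)))) from
    List.filter_congr (by
      intro k _hk
      rw [PySem.List.foldl_pyRange_zero_pyGetD'
        (matrix.filter (fun r => r.any (fun v => decide (v ≠ 0)))) []
        (fun flag r => if PySem.List.pyGetD r (k : Int) 0 ≠ 0 then 1 else flag) 0]
      rw [flag_any_col (matrix.filter (fun r => r.any (fun v => decide (v ≠ 0)))) (k : Int) 0]
      simp only [PySem.List.pyGetD_natCast]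
      cases hany : (matrix.filter (fun r => r.any (fun v => decide (v ≠ 0)))).any
          (fun r => decide (r.getD k 0 ≠ 0)) with
      | true => simp [hany]
      | false => simp [hany])]
  -- A's column deletions: each outer step deletes the same position from every row
  rw [show (fun (st : List (List Int) × Int) (j : Int) =>
        ((PySem.List.pyRange 0 (st.1.length : Int) 1).foldl
          (fun m i => PySem.List.pySetD m i (pvDel (PySem.List.pyGetD m i []) (j - st.2))) st.1,
         st.2 + 1))
      = (fun (st : List (List Int) × Int) (j : Int) =>
          (st.1.map (fun r => pvDel r (j - st.2)), st.2 + 1)) from by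
    funext st j
    simp only [Prod.mk.injEq]
    refine ⟨?_, trivial⟩
    have h := setfold_map0 (fun r => pvDel r (j - st.2)) st.1
    simpa using h]
  rw [foldmap]
  -- per surviving row, the shifted deletions drop exactly the zero columns
  rw [List.map_congr_left (by
    intro r hr
    have hlen := hrlen r hr
    have h := del_fold (fun (k : Nat) =>
        !((matrix.filter (fun r => r.any (fun v => decide (v ≠ 0)))).any
          (fun r => decide (r.getD k 0 ≠ 0)))) r [] 0 0 (by simp)
    simp only [List.nil_append, Nat.cast_zero] at h
    rw [← List.range_eq_range', hlen] at h
    rw [h] :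
      ∀ r ∈ matrix.filter (fun r => r.any (fun v => decide (v ≠ 0))),
        ((((List.range c).filter
            (fun (k : Nat) => !((matrix.filter (fun r => r.any (fun v => decide (v ≠ 0)))).any
              (fun r => decide (r.getD k 0 ≠ 0))))).map (fun k : Nat => (k : Int))).foldl
          (fun st j => (pvDel st.1 (j - st.2), st.2 + 1)) (r, (0 : Int))).1
        = dropIdx (fun (k : Nat) =>
            !((matrix.filter (fun r => r.any (fun v => decide (v ≠ 0)))).any
              (fun r => decide (r.getD k 0 ≠ 0)))) 0 r)]
  dsimp only
  -- B's sorted set of nonzero-column indices is the increasing list of surviving columns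
  have hpw : (((List.range c).filter
      (fun (k : Nat) => !(!((matrix.filter (fun r => r.any (fun v => decide (v ≠ 0)))).any
        (fun r => decide (r.getD k 0 ≠ 0)))))).map (fun k : Nat => (k : Int))).Pairwise (· < ·) :=
    List.pairwise_map.mpr ((List.pairwise_lt_range.filter _).imp (by exact_mod_cast fun a => a))
  have hcols : PySem.List.sorted
      (PySem.Set.ofList
        ((matrix.filter (fun r => r.any (fun v => decide (v ≠ 0)))).foldl
          (fun acc r =>
            acc ++ List.map Prod.fst (List.filter (fun p => decide (p.2 ≠ 0))
              (PySem.List.enumerate r 0))) []))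
      (fun j => j) false
      = ((List.range c).filter
          (fun (k : Nat) => !(!((matrix.filter (fun r => r.any (fun v => decide (v ≠ 0)))).any
            (fun r => decide (r.getD k 0 ≠ 0)))))).map (fun k : Nat => (k : Int)) := by
    rw [PySem.List.foldl_append_eq_flatMap]
    simp only [List.nil_append]
    apply PySem.List.sorted_eq_of_perm_of_pairwise_lt
    · refine (List.perm_ext_iff_of_nodup (hpw.imp ne_of_lt) (PySem.Set.nodup_ofList _)).mpr ?_
      intro a
      rw [PySem.Set.mem_ofList]
      simp only [List.mem_map, List.mem_range, List.mem_flatMap,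
        PySem.List.mem_enumerate_iff, Bool.not_not, List.any_eq_true, decide_eq_true_eq]
      constructor
      · rintro ⟨k, hk', rfl⟩
        rw [List.mem_filter] at hk'
        obtain ⟨hkr, hany⟩ := hk'
        rw [List.any_eq_true] at hany
        obtain ⟨r, hr, hrk⟩ := hany
        have hlen := hrlen r hr
        have hkc : k < r.length := by rw [List.mem_range] at hkr; omega
        refine ⟨r, hr, ⟨(0 + (k : Int), r[k]), ?_, by simp⟩⟩
        rw [List.mem_filter]
        refine ⟨?_, ?_⟩
        · rw [PySem.List.mem_enumerate_iff]; exact ⟨k, hkc, rfl⟩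
        · simpa [List.getD_eq_getElem, List.getElem?_eq_getElem hkc] using hrk
      · rintro ⟨r, hr, p, hp, hpa⟩
        rw [List.mem_filter] at hp
        obtain ⟨hpe, hpne⟩ := hp
        rw [PySem.List.mem_enumerate_iff] at hpe
        obtain ⟨k, hk, rfl⟩ := hpe
        have hlen := hrlen r hr
        refine ⟨k, ?_, by simpa using hpa⟩
        rw [List.mem_filter]
        refine ⟨by rw [List.mem_range]; omega, ?_⟩
        rw [List.any_eq_true]
        exact ⟨r, hr, by simpa [List.getD_eq_getElem, List.getElem?_eq_getElem hk] using hpne⟩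
    · exact hpw.imp (fun h => h)
  rw [hcols]
  refine List.map_congr_left ?_
  intro r hr
  have hlen := hrlen r hr
  have h := dropIdx_map (fun (k : Nat) =>
      !((matrix.filter (fun r => r.any (fun v => decide (v ≠ 0)))).any
        (fun r => decide (r.getD k 0 ≠ 0)))) (0 : Int) r []
  simp only [List.length_nil, List.nil_append] at h
  rw [← List.range_eq_range', hlen] at h
  rw [h, List.map_map]
  refine List.map_congr_left ?_
  intro k hk
  simp
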